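-- pv_equiv track=rewrite | github.com/itsax404/mkdocs-protobuf | mkdocs_protobuf_plugin/i18n_support.py | build_i18n_nav_tree
-- ===== SOURCE A (Python) =====
-- def build_i18n_nav_tree(file_paths, languages):
--     """Build navigation trees for each language."""
--     lang_trees = {}
--
--     # Group files by language
--     for lang in languages:
--         lang_prefix = f"{lang}/"
--         # Filter files for this language
--         lang_files = [f for f in file_paths if f.startswith(lang_prefix)]
--         if lang_files:
--             # Strip the language prefix for tree building
--             stripped_files = [f[len(lang_prefix):] for f in lang_files]
--             lang_trees[lang] = stripped_files
--
--     return lang_trees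
-- ===== SOURCE B (Python) =====
-- def _split_first(f):
--     """Split a path at its first '/': (head, tail), or None if there is no '/'."""
--     i = f.find('/')
--     if i == -1:
--         return None
--     return (f[:i], f[i + 1:])
--
--
-- def build_i18n_nav_tree(file_paths, languages):
--     """Build navigation trees for each language."""
--     # One pass over the files: bucket each path by its first segment.
--     pairs = [p for p in map(_split_first, file_paths) if p is not None]
--     index = {}
--     for head, rest in pairs:
--         index[head] = index.get(head, []) + [rest]
--     # One pass over the languages: pick the non-empty buckets, in language order.
--     lang_trees = {}
--     for lang in languages:
--         bucket = index.get(lang, [])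
--         if bucket:
--             lang_trees[lang] = bucket
--     return lang_trees
-- ===== Notes on version B (the rewrite author's own statement) =====
-- stated objective: faster
-- what changed: Instead of re-scanning all file_paths once per language with startswith, B makes one pass over the files splitting each path at its first '/' into a bucket table keyed by the first segment, then one pass over the languages selecting non-empty buckets in language order.
-- outside the precondition, e.g. on build_i18n_nav_tree(['a/b/c'], ['a/b']): A returns {'a/b': ['c']}, B returns {}
import Mathlib
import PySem

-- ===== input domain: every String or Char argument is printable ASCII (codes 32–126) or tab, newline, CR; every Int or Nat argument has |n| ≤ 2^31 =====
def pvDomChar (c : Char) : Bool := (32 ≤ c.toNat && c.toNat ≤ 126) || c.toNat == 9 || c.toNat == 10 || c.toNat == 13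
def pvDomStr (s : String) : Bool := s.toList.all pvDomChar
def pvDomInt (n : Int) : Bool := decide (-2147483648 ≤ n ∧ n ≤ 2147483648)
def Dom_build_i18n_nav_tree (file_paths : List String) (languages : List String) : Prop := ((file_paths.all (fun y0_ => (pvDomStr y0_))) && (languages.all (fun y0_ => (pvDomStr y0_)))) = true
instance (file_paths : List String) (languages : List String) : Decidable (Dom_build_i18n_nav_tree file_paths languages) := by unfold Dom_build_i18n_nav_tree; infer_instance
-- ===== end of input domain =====

-- B replaces A's per-language rescans of file_paths by one bucketing pass over the files
-- (split each path at its first '/') followed by one selection pass over the languages (objective: faster).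


-- ===== PORT A =====
def build_i18n_nav_tree (file_paths : List String) (languages : List String) : List (String × List String) :=
  (languages.foldl (fun lang_trees lang =>
    let lang_prefix : String := lang ++ "/"
    let lang_files := file_paths.filter (fun f => PySem.Str.startswith f lang_prefix)
    if lang_files ≠ [] then
      lang_trees.insert lang
        (lang_files.map (fun f => PySem.Str.slice f (some (PySem.Str.len lang_prefix)) none))
    else lang_trees) (PySem.Dict.empty : PySem.Dict String (List String))).items

-- ===== PORT B =====
-- _split_first: split a path at its first '/', or None if there is no '/'
def pvSplitFirst (f : String) : Option (String × String) :=
  let i := PySem.Str.find f "/"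
  if i = -1 then none
  else some (PySem.Str.slice f none (some i), PySem.Str.slice f (some (i + 1)) none)

def build_i18n_nav_tree_alt (file_paths : List String) (languages : List String) : List (String × List String) :=
  let pairs := file_paths.filterMap pvSplitFirst
  let index := pairs.foldl (fun d p => d.modify p.1 [] (fun b => b ++ [p.2]))
      (PySem.Dict.empty : PySem.Dict String (List String))
  (languages.foldl (fun lang_trees lang =>
    let bucket := index.getD lang []
    if bucket ≠ [] then lang_trees.insert lang bucket else lang_trees)
    (PySem.Dict.empty : PySem.Dict String (List String))).items

-- ===== PRECONDITION & SPEC =====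
-- Pre_ excludes only inputs where some language contains '/' AND actually prefix-matches a file
-- path: language codes do not contain '/', so such a "language" is a path prefix outside the natural
-- domain, and B's first-segment bucketing deliberately does not key on it (A still returns there).
def Pre_build_i18n_nav_tree (file_paths : List String) (languages : List String) : Prop :=
  ∀ lang ∈ languages, '/' ∈ lang.toList →
    ∀ f ∈ file_paths, PySem.Str.startswith f (lang ++ "/") = false
instance (file_paths : List String) (languages : List String) : Decidable (Pre_build_i18n_nav_tree file_paths languages) := by unfold Pre_build_i18n_nav_tree; infer_instance

def pvWitness_build_i18n_nav_tree : List String × List String :=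
  (["en/index.md", "en/guide/setup.md", "readme.md", "fr/index.md"], ["en", "fr", "de"])

def Spec_build_i18n_nav_tree (file_paths : List String) (languages : List String) (out : List (String × List String)) : Prop := out = build_i18n_nav_tree_alt file_paths languages
instance (file_paths : List String) (languages : List String) (out : List (String × List String)) : Decidable (Spec_build_i18n_nav_tree file_paths languages out) := by unfold Spec_build_i18n_nav_tree; infer_instance

-- ===== CLAIM (what is proved, stated in full; the proofs are below) =====
def Claim_equal_build_i18n_nav_tree : Prop := ∀ (file_paths : List String) (languages : List String), Dom_build_i18n_nav_tree file_paths languages → Pre_build_i18n_nav_tree file_paths languages → Spec_build_i18n_nav_tree file_paths languages (build_i18n_nav_tree file_paths languages)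

-- ===== LEMMAS AND PROOFS =====

-- every slash-containing char list splits at its first '/'
lemma pv_exists_split (F : List Char) (h : '/' ∈ F) :
    ∃ H T, F = H ++ '/' :: T ∧ '/' ∉ H := by
  induction F with
  | nil => cases h
  | cons c F ih =>
    by_cases hc : c = '/'
    · exact ⟨[], F, by simp [hc], by simp⟩
    · have h' : '/' ∈ F := by
        rcases List.mem_cons.mp h with h | h
        · exact absurd h.symm hc
        · exact h
      rcases ih h' with ⟨H, T, hF, hH⟩
      refine ⟨c :: H, T, by simp [hF], ?_⟩
      simp only [List.mem_cons, not_or]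
      exact ⟨fun h => hc h.symm, hH⟩

lemma pv_find_slash (H T : List Char) (hH : '/' ∉ H) :
    PySem.Chars.find (H ++ '/' :: T) ['/'] = (H.length : Int) := by
  have hinf : ['/'] <:+: (H ++ '/' :: T) := (List.singleton_infix_iff _ _).mpr (by simp)
  have h0 : 0 ≤ PySem.Chars.find (H ++ '/' :: T) ['/'] :=
    (PySem.Chars.find_nonneg_iff _ _).mpr hinf
  rcases PySem.Chars.find_spec h0 with ⟨hpre, hmin⟩
  set n := PySem.Chars.find (H ++ '/' :: T) ['/'] with hn
  -- n.toNat ≤ H.length since there is an occurrence at H.length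
  have hle : n.toNat ≤ H.length := by
    by_contra hlt
    exact hmin H.length (by omega) (by simp)
  -- and ¬ n.toNat < H.length: positions before H.length carry characters of H
  have hge : ¬ n.toNat < H.length := by
    intro hlt
    have hhead : ((H ++ '/' :: T).drop n.toNat).head? = some '/' := by
      rcases hpre with ⟨t, ht⟩
      rw [← ht]; rfl
    rw [List.head?_drop, List.getElem?_append_left hlt] at hhead
    exact hH (List.mem_of_getElem? hhead)
  omega

lemma pv_find_no_slash (F : List Char) (h : '/' ∉ F) :
    PySem.Chars.find F ['/'] = -1 := by
  rw [PySem.Chars.find_eq_neg_one_iff]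
  rw [List.singleton_infix_iff]
  exact h

lemma pv_splitFirst_none (f : String) (h : '/' ∉ f.toList) : pvSplitFirst f = none := by
  unfold pvSplitFirst
  simp [PySem.Str.find_eq, pv_find_no_slash _ h, show ("/" : String).toList = ['/'] from rfl]

lemma pv_splitFirst_some (f : String) (H T : List Char) (hf : f.toList = H ++ '/' :: T)
    (hH : '/' ∉ H) :
    ∃ h t : String, pvSplitFirst f = some (h, t) ∧ h.toList = H ∧ t.toList = T := by
  have hfind : PySem.Str.find f "/" = (H.length : Int) := by
    rw [PySem.Str.find_eq, hf, show ("/" : String).toList = ['/'] from rfl]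
    exact pv_find_slash H T hH
  refine ⟨PySem.Str.slice f none (some (H.length : Int)),
          PySem.Str.slice f (some ((H.length : Int) + 1)) none, ?_, ?_, ?_⟩
  · unfold pvSplitFirst
    rw [hfind]
    simp
  · rw [PySem.Str.toList_slice, PySem.Chars.slice_eq_listSlice,
        PySem.List.slice_to _ (by positivity), hf]
    simp
  · rw [PySem.Str.toList_slice, PySem.Chars.slice_eq_listSlice]
    have : ((H.length : Int) + 1) = ((H.length + 1 : Nat) : Int) := by push_cast; ring
    rw [this, PySem.List.slice_from _ (by positivity), hf]
    simp

-- startswith (lang ++ "/") for a slash-free lang means: first segment = lang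
lemma pv_startswith_iff (lang : String) (hns : '/' ∉ lang.toList)
    (f : String) (H T : List Char) (hf : f.toList = H ++ '/' :: T) (hH : '/' ∉ H) :
    PySem.Str.startswith f (lang ++ "/") = true ↔ H = lang.toList := by
  rw [PySem.Str.startswith_eq, PySem.Chars.startswith_iff, hf,
      String.toList_append, show ("/" : String).toList = ['/'] from rfl]
  constructor
  · rintro ⟨u, hu⟩
    -- lang.toList ++ ['/'] ++ u = H ++ '/' :: T ; both lang.toList and H are the
    -- longest slash-free prefix, hence equal
    have h1 : (lang.toList ++ '/' :: u).takeWhile (fun c => c != '/') = lang.toList := by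
      rw [List.takeWhile_append_of_pos]
      · simp
      · intro a ha
        simp only [bne_iff_ne, ne_eq]
        intro hhh
        exact hns (hhh ▸ ha)
    have h2 : (H ++ '/' :: T).takeWhile (fun c => c != '/') = H := by
      rw [List.takeWhile_append_of_pos]
      · simp
      · intro a ha
        simp only [bne_iff_ne, ne_eq]
        intro hhh
        exact hH (hhh ▸ ha)
    have h3 := hu ▸ h2
    rw [show lang.toList ++ ['/'] ++ u = lang.toList ++ '/' :: u by simp] at h3
    rw [h1] at h3
    exact h3.symm
  · rintro rfl
    exact ⟨T, by simp⟩

-- if f starts with lang ++ "/" then f contains a '/'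
lemma pv_startswith_mem (lang f : String)
    (h : PySem.Str.startswith f (lang ++ "/") = true) : '/' ∈ f.toList := by
  rw [PySem.Str.startswith_eq, PySem.Chars.startswith_iff, String.toList_append,
      show ("/" : String).toList = ['/'] from rfl] at h
  rcases h with ⟨u, hu⟩
  rw [← hu]
  simp

-- the first component produced by pvSplitFirst never contains '/'
lemma pv_splitFirst_head (f h t : String) (hs : pvSplitFirst f = some (h, t)) :
    '/' ∉ h.toList := by
  by_cases hmem : '/' ∈ f.toList
  · rcases pv_exists_split f.toList hmem with ⟨H, T, hf, hH⟩
    rcases pv_splitFirst_some f H T hf hH with ⟨h', t', hs', hh', _⟩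
    rw [hs] at hs'
    cases hs'
    rw [hh']
    exact hH
  · rw [pv_splitFirst_none f hmem] at hs
    cases hs

-- the bucket B collects for a slash-free lang is exactly A's filtered-and-stripped list
lemma pv_bucket_eq (lang : String) (hns : '/' ∉ lang.toList) (fs : List String) :
    ((fs.filterMap pvSplitFirst).filter (fun p => p.1 == lang)).map (fun p => p.2)
    = (fs.filter (fun f => PySem.Str.startswith f (lang ++ "/"))).map
        (fun f => PySem.Str.slice f (some (PySem.Str.len (lang ++ "/"))) none) := by
  induction fs with
  | nil => rfl
  | cons f fs ih =>
    by_cases hmem : '/' ∈ f.toList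
    · rcases pv_exists_split f.toList hmem with ⟨H, T, hf, hH⟩
      rcases pv_splitFirst_some f H T hf hH with ⟨h, t, hsplit, hhl, htl⟩
      by_cases heq : H = lang.toList
      · have hsw : PySem.Str.startswith f (lang ++ "/") = true :=
          (pv_startswith_iff lang hns f H T hf hH).mpr heq
        have hhlang : h = lang := String.toList_inj.mp (by rw [hhl, heq])
        have hstr : t = PySem.Str.slice f (some (PySem.Str.len (lang ++ "/"))) none := by
          apply String.toList_inj.mp
          have hlen : PySem.Str.len (lang ++ "/") = ((lang.toList.length + 1 : Nat) : Int) := by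
            rw [PySem.Str.len_eq, String.toList_append]
            push_cast
            simp
          rw [htl, PySem.Str.toList_slice, PySem.Chars.slice_eq_listSlice, hlen,
              PySem.List.slice_from _ (by positivity), hf, heq]
          simp [List.drop_append]
        simp only [List.filterMap_cons, hsplit, List.filter_cons, hhlang, hsw,
          BEq.rfl, if_true, List.map_cons, ih, hstr]
      · have hsw : PySem.Str.startswith f (lang ++ "/") = false := by
          rw [Bool.eq_false_iff]
          intro hc
          exact heq ((pv_startswith_iff lang hns f H T hf hH).mp hc)
        have hbeq : (h == lang) = false := by
          simp only [beq_eq_false_iff_ne, ne_eq]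
          intro hc
          exact heq (by rw [← hhl, hc])
        have hsw' : PySem.Chars.startswith f.toList (lang.toList ++ ['/']) = false := by
          simpa using hsw
        simp [hsplit, hbeq, hsw', ih]
    · have hsw : PySem.Str.startswith f (lang ++ "/") = false := by
        rw [Bool.eq_false_iff]
        intro hc
        exact hmem (pv_startswith_mem lang f hc)
      have hsw' : PySem.Chars.startswith f.toList (lang.toList ++ ['/']) = false := by
        simpa using hsw
      simp [pv_splitFirst_none f hmem, hsw', ih]

-- ===== VERDICT (by name: the statement is the Claim_ definition above) =====
theorem build_i18n_nav_tree_spec : Claim_equal_build_i18n_nav_tree := by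
  intro file_paths languages _hdom hpre
  unfold Spec_build_i18n_nav_tree build_i18n_nav_tree build_i18n_nav_tree_alt
  congr 1
  apply PySem.List.foldl_congr_mem
  intro acc lang hlang
  have hgetD :
      ((file_paths.filterMap pvSplitFirst).foldl
          (fun d p => d.modify p.1 [] (fun b => b ++ [p.2]))
          (PySem.Dict.empty : PySem.Dict String (List String))).getD lang []
      = ((file_paths.filterMap pvSplitFirst).filter (fun p => p.1 == lang)).map
          (fun p => p.2) := by
    rw [PySem.Dict.getD_foldl_modify_append, PySem.Dict.getD_empty]
    simp
  by_cases hslash : '/' ∈ lang.toList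
  · -- lang is a path prefix: A filters nothing (Pre_) and B's buckets never key on it
    have hA : file_paths.filter
        (fun f => PySem.Chars.startswith f.toList (lang.toList ++ ['/'])) = [] := by
      rw [List.filter_eq_nil_iff]
      intro f hf
      simpa using hpre lang hlang hslash f hf
    have hB : (file_paths.filterMap pvSplitFirst).filter (fun p => p.1 == lang) = [] := by
      rw [List.filter_eq_nil_iff]
      intro p hp
      rcases List.mem_filterMap.mp hp with ⟨f, _, hs⟩
      have hnp : '/' ∉ p.1.toList := pv_splitFirst_head f p.1 p.2 (by simpa using hs)
      simp only [beq_iff_eq]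
      intro hc
      exact hnp (hc ▸ hslash)
    simp [hgetD, hA, hB]
  · have hbucket :
        ((file_paths.filterMap pvSplitFirst).filter (fun p => p.1 == lang)).map
            (fun p => p.2)
        = (file_paths.filter (fun f => PySem.Str.startswith f (lang ++ "/"))).map
            (fun f => PySem.Str.slice f (some (PySem.Str.len (lang ++ "/"))) none) :=
      pv_bucket_eq lang hslash file_paths
    simp only [hgetD, hbucket, ne_eq, List.map_eq_nil_iff]
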